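-- pv_equiv track=rewrite | github.com/Xandynhu/LeetCode | Easy/defanging-an-ip-address-v1.py | foo
-- ===== SOURCE A (Python) =====
-- def foo(input):
--     # defines the output empty string
--     output = ""
--
--     # search for "."
--     for i in range(len(input)):
--         # if finds it, concatenate "[.]" with the output string
--         if input[i] == ".":
--             output = output + "[.]"
--
--         # else, concatenate the original element with the output string
--         else:
--             output = output + input[i]
--
--     return output
-- ===== SOURCE B (Python) =====
-- def foo(input):
--     # split on the dot delimiter, then stitch the segments back with "[.]"
--     return "[.]".join(input.split("."))
-- ===== Notes on version B (the rewrite author's own statement) =====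
-- stated objective: idiomatic
-- what changed: Replaces A's character-by-character conditional string concatenation with a split-on-'.' then join-with-'[.]' over the list of segments.
import Mathlib
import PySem

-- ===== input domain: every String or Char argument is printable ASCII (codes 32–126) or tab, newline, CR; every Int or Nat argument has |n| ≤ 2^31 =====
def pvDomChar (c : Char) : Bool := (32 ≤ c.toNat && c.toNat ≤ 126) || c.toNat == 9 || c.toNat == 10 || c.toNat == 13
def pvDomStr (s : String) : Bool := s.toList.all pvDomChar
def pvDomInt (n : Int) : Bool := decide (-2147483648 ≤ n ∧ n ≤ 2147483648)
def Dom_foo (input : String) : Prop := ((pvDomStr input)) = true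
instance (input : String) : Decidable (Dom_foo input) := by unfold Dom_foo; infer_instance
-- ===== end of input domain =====

-- B replaces A's per-character conditional concatenation with split-on-"." / join-with-"[.]" (idiomatic).

-- ===== PORT A =====
-- A: scan the characters in index order, appending "[.]" for a dot and the character itself otherwise.
def foo (input : String) : String :=
  String.ofList
    (input.toList.foldl
      (fun out c => if c = '.' then out ++ ['[', '.', ']'] else out ++ [c]) [])

-- ===== PORT B =====
-- B: input.split(".") then "[.]".join(...); '.' is non-empty so split? always returns some.
def foo_alt (input : String) : String :=
  PySem.Str.join "[.]" ((PySem.Str.split? input ".").getD [])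

-- ===== PRECONDITION & SPEC =====
def Spec_foo (input : String) (out : String) : Prop := out = foo_alt input
instance (input : String) (out : String) : Decidable (Spec_foo input out) := by unfold Spec_foo; infer_instance

-- ===== CLAIM (what is proved, stated in full; the proofs are below) =====
def Claim_equal_foo : Prop := ∀ (input : String), Dom_foo input → Spec_foo input (foo input)

-- ===== LEMMAS AND PROOFS =====

-- what one character contributes to the output
def fooPiece (c : Char) : List Char := if c = '.' then ['[', '.', ']'] else [c]

-- a direct structural recursion equivalent to splitOn.go for the single-char separator '.'
def simpleSplit : List Char → List Char → List (List Char)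
  | [], cur => [cur.reverse]
  | c :: rest, cur =>
      if c = '.' then cur.reverse :: simpleSplit rest [] else simpleSplit rest (c :: cur)

theorem simpleSplit_ne_nil (l cur : List Char) : simpleSplit l cur ≠ [] := by
  induction l generalizing cur with
  | nil => simp [simpleSplit]
  | cons c rest ih =>
      simp only [simpleSplit]
      split_ifs <;> simp [ih]

theorem foldl_eq_flatMap (cs acc : List Char) :
    cs.foldl (fun out c => if c = '.' then out ++ ['[', '.', ']'] else out ++ [c]) acc
      = acc ++ cs.flatMap fooPiece := by
  induction cs generalizing acc with
  | nil => simp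
  | cons c rest ih =>
      simp only [List.foldl_cons, List.flatMap_cons, ih, fooPiece]
      split_ifs <;> simp

theorem go_eq (fuel : Nat) (l cur : List Char) (acc : List (List Char)) (h : l.length < fuel) :
    PySem.Chars.splitOn.go ['.'] fuel l cur acc = acc.reverse ++ simpleSplit l cur := by
  induction fuel generalizing l cur acc with
  | zero => omega
  | succ n ih =>
      cases l with
      | nil => simp [PySem.Chars.splitOn.go, simpleSplit]
      | cons c rest =>
          simp only [PySem.Chars.splitOn.go, List.isPrefixOf, Bool.and_true]
          by_cases hc : c = '.'
          · subst hc
            simp only [beq_self_eq_true, if_pos, List.length_cons, List.length_nil,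
              List.drop_succ_cons, List.drop_zero]
            rw [ih rest [] (cur.reverse :: acc) (by simpa using Nat.lt_of_succ_lt_succ h)]
            simp [simpleSplit]
          · have hbc : ('.' == c) = false := by
              simp [beq_eq_false_iff_ne]; exact fun e => hc e.symm
            simp only [hbc, Bool.false_eq_true, if_neg, not_false_eq_true]
            rw [ih rest (c :: cur) acc (by simpa using Nat.lt_of_succ_lt_succ h)]
            simp [simpleSplit, hc]

theorem intercalate_cons_cons (d a x : List Char) (xs : List (List Char)) :
    List.intercalate d (a :: x :: xs) = a ++ d ++ List.intercalate d (x :: xs) := by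
  simp [List.intercalate, List.intersperse]

theorem intercalate_simpleSplit (l cur : List Char) :
    List.intercalate ['[', '.', ']'] (simpleSplit l cur) = cur.reverse ++ l.flatMap fooPiece := by
  induction l generalizing cur with
  | nil => simp [simpleSplit, List.intercalate]
  | cons c rest ih =>
      by_cases hc : c = '.'
      · subst hc
        obtain ⟨a, t, ht⟩ := List.exists_cons_of_ne_nil (simpleSplit_ne_nil rest [])
        rw [show simpleSplit ('.' :: rest) cur = cur.reverse :: simpleSplit rest [] from by
          simp [simpleSplit]]
        rw [ht, intercalate_cons_cons, ← ht, ih]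
        simp [fooPiece]
      · simp only [simpleSplit, if_neg hc, List.flatMap_cons]
        rw [ih (c :: cur)]
        simp [fooPiece, hc]

theorem toList_eq (input : String) : (foo input).toList = (foo_alt input).toList := by
  have hdot : (".".toList) = ['.'] := by decide
  have hsep : ("[.]".toList) = ['[', '.', ']'] := by decide
  simp only [foo, foo_alt, PySem.Str.split?, PySem.Chars.split?, hdot, List.isEmpty_cons,
    Bool.false_eq_true, if_neg, not_false_eq_true, Option.map_some,
    Option.getD_some, PySem.Str.toList_join, hsep, List.map_map]
  rw [foldl_eq_flatMap]
  have hmap : ∀ xs : List (List Char),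
      List.map (String.toList ∘ String.ofList) xs = xs := by
    intro xs
    simp [Function.comp_def, String.toList_ofList]
  rw [hmap]
  unfold PySem.Chars.splitOn
  rw [go_eq (input.toList.length + 1) input.toList [] [] (by omega)]
  simp only [List.reverse_nil, List.nil_append]
  rw [show PySem.Chars.join ['[', '.', ']'] (simpleSplit input.toList []) =
        List.intercalate ['[', '.', ']'] (simpleSplit input.toList []) from rfl]
  rw [intercalate_simpleSplit, String.toList_ofList]
  simp

-- ===== VERDICT (by name: the statement is the Claim_ definition above) =====
theorem foo_spec : Claim_equal_foo := by
  intro input _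
  unfold Spec_foo
  have h := toList_eq input
  exact String.toList_inj.mp h
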